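-- pv_equiv track=rewrite | github.com/Hoegh07/Project-Euler | Euler759/Euler759.py | Sb2n
-- ===== SOURCE A (Python) =====
-- MOD = 1000000007
--
-- def f(n):
--     b = 0
--     y = str(bin(n)[2:])
--     for j in range(0,len(y)):
--         if(y[j] == '1'):
--             b += 1
--     return b*n
--
-- def T(n):
--     return ((n*(n+1))//2)
--
-- memo_Sb = {}
--
-- def Sb(n):
--     if(n in memo_Sb):
--         return memo_Sb[n]
--     if(n == 0):
--         return 0
--     if(n%2 == 0):
--         c = (Sb(n//2)+Sb(n//2-1)+n//2)%MOD
--         memo_Sb[n] = c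
--         return c
--     c = (2*Sb(n//2)+n//2+1)%MOD
--     memo_Sb[n] = c
--     return c
--
-- memo_S1 = {}
--
-- def S1(n):
--     if(n in memo_S1):
--         return memo_S1[n]
--     if(n == 0):
--         return 0
--     if(n == 1):
--         return 1
--     if(n%2 == 0):
--         c = (f(1)+f(n)+4*S1(n//2-1)+Sb(n//2-1)+2*T(n//2-1)+(n//2-1))%MOD
--         memo_S1[n] = c
--         return c
--     c = (f(1)+4*S1(n//2)+Sb(n//2)+2*T(n//2)+(n//2))%MOD
--     memo_S1[n] = c
--     return c
--
-- def b(n):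
--     y = str(bin(n)[2:])
--     res = 0
--     for i in range(0,len(y)):
--         if(y[i] == '1'):
--             res += 1
--     return res
--
-- memo_Sb2 = {}
--
-- def Sb2(n):
--     if(n in memo_Sb2):
--         return memo_Sb2[n]
--     if(n == 0):
--         return 0
--     if(n == 1):
--         return 1
--     if(n%2 == 0):
--         c = (1+b(n)**2+2*Sb2(n//2-1)+2*Sb(n//2-1)+n//2-1)%MOD
--         memo_Sb2[n] = c
--         return c
--     c = (1+2*Sb2(n//2)+2*Sb(n//2)+n//2)%MOD
--     memo_Sb2[n] = c
--     return c
--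
-- memo_Sb2n = {}
--
-- def Sb2n(n):
--     if(n in memo_Sb2n):
--         return memo_Sb2n[n]
--     if(n == 0):
--         return 0
--     if(n == 1):
--         return 1
--     if(n%2 == 0):
--         c = (1+b(n)**2*n+4*Sb2n(n//2-1)+4*S1(n//2-1)+Sb2(n//2-1)+2*Sb(n//2-1)+2*T(n//2-1)+n//2-1)%MOD
--         memo_Sb2n[n] = c
--         return c
--     c = (1+4*Sb2n(n//2)+4*S1(n//2)+Sb2(n//2)+2*Sb(n//2)+2*T(n//2)+n//2)%MOD
--     memo_Sb2n[n] = c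
--     return c
-- ===== SOURCE B (Python) =====
-- MOD = 1000000007
--
-- def Sb2n(n):
--     # bottom-up: walk n's binary digits MSB->LSB keeping, for the current
--     # prefix p, the pairs (F(p), F(p-1)) for F in Sb, S1, Sb2, Sb2n,
--     # plus popcount(p); iterative, no recursion and no memo tables.
--     if n <= 0:
--         return 0
--     sb, sbm = 1, 0      # Sb(1), Sb(0)
--     s1, s1m = 1, 0      # S1(1), S1(0)
--     sb2, sb2m = 1, 0    # Sb2(1), Sb2(0)
--     s2n, s2nm = 1, 0    # Sb2n(1), Sb2n(0)
--     pc = 1              # popcount(p)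
--     p = 1
--     for bit in bin(n)[3:]:
--         q = p - 1
--         t_q = (q * (q + 1)) // 2
--         t_p = (p * (p + 1)) // 2
--         # values at 2p (even recurrences; the halved arguments are p and p-1)
--         e_sb  = (sb + sbm + p) % MOD
--         e_s1  = (1 + pc * 2 * p + 4 * s1m + sbm + 2 * t_q + q) % MOD
--         e_sb2 = (1 + pc ** 2 + 2 * sb2m + 2 * sbm + q) % MOD
--         e_s2n = (1 + pc ** 2 * 2 * p + 4 * s2nm + 4 * s1m + sb2m + 2 * sbm + 2 * t_q + q) % MOD
--         if bit == '1':
--             # new prefix 2p+1: odd recurrences at 2p+1; minus side is 2p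
--             o_sb  = (2 * sb + p + 1) % MOD
--             o_s1  = (1 + 4 * s1 + sb + 2 * t_p + p) % MOD
--             o_sb2 = (1 + 2 * sb2 + 2 * sb + p) % MOD
--             o_s2n = (1 + 4 * s2n + 4 * s1 + sb2 + 2 * sb + 2 * t_p + p) % MOD
--             sb, sbm, s1, s1m = o_sb, e_sb, o_s1, e_s1
--             sb2, sb2m, s2n, s2nm = o_sb2, e_sb2, o_s2n, e_s2n
--             pc += 1
--             p = 2 * p + 1
--         else:
--             # new prefix 2p: minus side is 2p-1 via the odd recurrences at 2p-1
--             m_sb  = (2 * sbm + q + 1) % MOD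
--             m_s1  = (1 + 4 * s1m + sbm + 2 * t_q + q) % MOD
--             m_sb2 = (1 + 2 * sb2m + 2 * sbm + q) % MOD
--             m_s2n = (1 + 4 * s2nm + 4 * s1m + sb2m + 2 * sbm + 2 * t_q + q) % MOD
--             sb, sbm, s1, s1m = e_sb, m_sb, e_s1, m_s1
--             sb2, sb2m, s2n, s2nm = e_sb2, m_sb2, e_s2n, m_s2n
--             p = 2 * p
--     return s2n
-- ===== Notes on version B (the rewrite author's own statement) =====
-- stated objective: alternative
-- what changed: Replaced A's four layered memoized top-down recursions (with module-level memo dicts) by a single iterative MSB-to-LSB walk over n's binary digits that maintains the pairs (F(p), F(p-1)) for F in Sb, S1, Sb2, Sb2n plus the prefix popcount, applying the same recurrences bottom-up with no recursion and no memo tables.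
import Mathlib
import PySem

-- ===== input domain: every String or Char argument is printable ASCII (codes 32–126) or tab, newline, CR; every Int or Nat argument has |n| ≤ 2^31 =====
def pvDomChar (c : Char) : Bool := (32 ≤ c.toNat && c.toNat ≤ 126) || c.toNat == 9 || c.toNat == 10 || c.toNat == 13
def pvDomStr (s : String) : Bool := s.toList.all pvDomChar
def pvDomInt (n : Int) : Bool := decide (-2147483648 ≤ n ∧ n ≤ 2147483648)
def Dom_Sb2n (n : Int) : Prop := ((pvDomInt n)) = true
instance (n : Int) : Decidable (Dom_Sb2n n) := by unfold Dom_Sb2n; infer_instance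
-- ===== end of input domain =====

-- B replaces A's four mutually layered memoized recursions by one iterative MSB-to-LSB
-- walk over n's binary digits that maintains the value pairs (F(p), F(p-1)); return values only.

-- ===== PORT A =====
-- b(n): Python builds bin(n) and counts '1' characters; ported exactly (for n ≥ 0)
-- as the div/mod recursion over the same binary digits.
def bA (n : Nat) : Int :=
  if n = 0 then 0 else bA (n / 2) + (n % 2 : Nat)
termination_by n
decreasing_by exact Nat.div_lt_self (by omega) (by omega)

def fA (n : Nat) : Int := bA n * (n : Int)

def TA (n : Nat) : Int := ((n : Int) * ((n : Int) + 1)) / 2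

def SbA (n : Nat) : Int :=
  if n = 0 then 0
  else if n % 2 = 0 then (SbA (n / 2) + SbA (n / 2 - 1) + ((n / 2 : Nat) : Int)) % 1000000007
  else (2 * SbA (n / 2) + ((n / 2 : Nat) : Int) + 1) % 1000000007
termination_by n
decreasing_by all_goals omega

def S1A (n : Nat) : Int :=
  if n = 0 then 0
  else if n = 1 then 1
  else if n % 2 = 0 then
    (fA 1 + fA n + 4 * S1A (n / 2 - 1) + SbA (n / 2 - 1) + 2 * TA (n / 2 - 1)
      + ((n / 2 - 1 : Nat) : Int)) % 1000000007
  else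
    (fA 1 + 4 * S1A (n / 2) + SbA (n / 2) + 2 * TA (n / 2) + ((n / 2 : Nat) : Int)) % 1000000007
termination_by n
decreasing_by all_goals omega

def Sb2A (n : Nat) : Int :=
  if n = 0 then 0
  else if n = 1 then 1
  else if n % 2 = 0 then
    (1 + bA n ^ 2 + 2 * Sb2A (n / 2 - 1) + 2 * SbA (n / 2 - 1) + ((n / 2 : Nat) : Int) - 1) % 1000000007
  else
    (1 + 2 * Sb2A (n / 2) + 2 * SbA (n / 2) + ((n / 2 : Nat) : Int)) % 1000000007
termination_by n
decreasing_by all_goals omega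

def Sb2nA (n : Nat) : Int :=
  if n = 0 then 0
  else if n = 1 then 1
  else if n % 2 = 0 then
    (1 + bA n ^ 2 * (n : Int) + 4 * Sb2nA (n / 2 - 1) + 4 * S1A (n / 2 - 1) + Sb2A (n / 2 - 1)
      + 2 * SbA (n / 2 - 1) + 2 * TA (n / 2 - 1) + ((n / 2 : Nat) : Int) - 1) % 1000000007
  else
    (1 + 4 * Sb2nA (n / 2) + 4 * S1A (n / 2) + Sb2A (n / 2) + 2 * SbA (n / 2)
      + 2 * TA (n / 2) + ((n / 2 : Nat) : Int)) % 1000000007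
termination_by n
decreasing_by all_goals omega

-- Python A diverges (RecursionError) for negative n, excluded by Pre_; toNat is exact on the nonnegative domain.
def Sb2n (n : Int) : Int := Sb2nA n.toNat

-- ===== PORT B =====
-- binary digits of n, most significant first (bin(n)[2:] as a Bool list)
def pvBits (n : Nat) : List Bool :=
  if n = 0 then [] else pvBits (n / 2) ++ [n % 2 == 1]
termination_by n
decreasing_by exact Nat.div_lt_self (by omega) (by omega)

structure PVSt where
  sb : Int
  sbm : Int
  s1 : Int
  s1m : Int
  sb2 : Int
  sb2m : Int
  s2n : Int
  s2nm : Int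
  pc : Int
  p : Int
deriving Repr, DecidableEq

def pvStep (st : PVSt) (bit : Bool) : PVSt :=
  let q := st.p - 1
  let tq := (q * (q + 1)) / 2
  let tp := (st.p * (st.p + 1)) / 2
  let eSb := (st.sb + st.sbm + st.p) % 1000000007
  let eS1 := (1 + st.pc * 2 * st.p + 4 * st.s1m + st.sbm + 2 * tq + q) % 1000000007
  let eSb2 := (1 + st.pc ^ 2 + 2 * st.sb2m + 2 * st.sbm + q) % 1000000007
  let eS2n := (1 + st.pc ^ 2 * 2 * st.p + 4 * st.s2nm + 4 * st.s1m + st.sb2m + 2 * st.sbm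
      + 2 * tq + q) % 1000000007
  if bit then
    { sb := (2 * st.sb + st.p + 1) % 1000000007, sbm := eSb,
      s1 := (1 + 4 * st.s1 + st.sb + 2 * tp + st.p) % 1000000007, s1m := eS1,
      sb2 := (1 + 2 * st.sb2 + 2 * st.sb + st.p) % 1000000007, sb2m := eSb2,
      s2n := (1 + 4 * st.s2n + 4 * st.s1 + st.sb2 + 2 * st.sb + 2 * tp + st.p) % 1000000007,
      s2nm := eS2n, pc := st.pc + 1, p := 2 * st.p + 1 }
  else
    { sb := eSb, sbm := (2 * st.sbm + q + 1) % 1000000007,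
      s1 := eS1, s1m := (1 + 4 * st.s1m + st.sbm + 2 * tq + q) % 1000000007,
      sb2 := eSb2, sb2m := (1 + 2 * st.sb2m + 2 * st.sbm + q) % 1000000007,
      s2n := eS2n,
      s2nm := (1 + 4 * st.s2nm + 4 * st.s1m + st.sb2m + 2 * st.sbm + 2 * tq + q) % 1000000007,
      pc := st.pc, p := 2 * st.p }

def pvInit : PVSt := ⟨1, 0, 1, 0, 1, 0, 1, 0, 1, 1⟩

def Sb2n_alt (n : Int) : Int :=
  if n ≤ 0 then 0
  else (((pvBits n.toNat).drop 1).foldl pvStep pvInit).s2n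

-- ===== PRECONDITION & SPEC =====
-- Pre_ excludes negative n, on which Python A never returns (RecursionError).
def Pre_Sb2n (n : Int) : Prop := 0 ≤ n
instance (n : Int) : Decidable (Pre_Sb2n n) := by unfold Pre_Sb2n; infer_instance
def pvWitness_Sb2n : Int := (6)

def Spec_Sb2n (n : Int) (out : Int) : Prop := out = Sb2n_alt n
instance (n : Int) (out : Int) : Decidable (Spec_Sb2n n out) := by unfold Spec_Sb2n; infer_instance

-- ===== CLAIM (what is proved, stated in full; the proofs are below) =====
def Claim_equal_Sb2n : Prop := ∀ (n : Int), Dom_Sb2n n → Pre_Sb2n n → Spec_Sb2n n (Sb2n n)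

-- ===== LEMMAS AND PROOFS =====

def pvVal (p : Nat) (L : List Bool) : Nat :=
  L.foldl (fun a b => 2 * a + (if b then 1 else 0)) p

def pvGood (p : Nat) (st : PVSt) : Prop :=
  st.sb = SbA p ∧ st.sbm = SbA (p - 1) ∧ st.s1 = S1A p ∧ st.s1m = S1A (p - 1) ∧
  st.sb2 = Sb2A p ∧ st.sb2m = Sb2A (p - 1) ∧ st.s2n = Sb2nA p ∧ st.s2nm = Sb2nA (p - 1) ∧
  st.pc = bA p ∧ st.p = (p : Int)

lemma bA_zero : bA 0 = 0 := by rw [bA]; simp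
lemma bA_one : bA 1 = 1 := by rw [bA]; norm_num [bA_zero]
lemma fA_one : fA 1 = 1 := by rw [fA, bA_one]; norm_num
lemma TA_zero : TA 0 = 0 := by norm_num [TA]
lemma SbA_zero : SbA 0 = 0 := by rw [SbA]; simp
lemma SbA_one : SbA 1 = 1 := by rw [SbA]; norm_num [SbA_zero]
lemma S1A_zero : S1A 0 = 0 := by rw [S1A]; simp
lemma S1A_one : S1A 1 = 1 := by rw [S1A]; norm_num
lemma Sb2A_zero : Sb2A 0 = 0 := by rw [Sb2A]; simp
lemma Sb2A_one : Sb2A 1 = 1 := by rw [Sb2A]; norm_num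
lemma Sb2nA_zero : Sb2nA 0 = 0 := by rw [Sb2nA]; simp
lemma Sb2nA_one : Sb2nA 1 = 1 := by rw [Sb2nA]; norm_num

lemma bA_two (p : Nat) (hp : 1 ≤ p) : bA (2 * p) = bA p := by
  rw [bA]
  have h0 : ¬ (2 * p = 0) := by omega
  have h2 : 2 * p / 2 = p := by omega
  have h3 : 2 * p % 2 = 0 := by omega
  simp [h0, h2, h3]

lemma bA_two1 (p : Nat) : bA (2 * p + 1) = bA p + 1 := by
  rw [bA]
  have h2 : (2 * p + 1) / 2 = p := by omega
  have h3 : (2 * p + 1) % 2 = 1 := by omega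
  simp [h2, h3]

lemma SbA_two (p : Nat) (hp : 1 ≤ p) :
    SbA (2 * p) = (SbA p + SbA (p - 1) + (p : Int)) % 1000000007 := by
  rw [SbA]
  have h0 : ¬ (2 * p = 0) := by omega
  have h2 : 2 * p / 2 = p := by omega
  have h3 : 2 * p % 2 = 0 := by omega
  simp [h0, h2, h3]

lemma SbA_two1 (p : Nat) :
    SbA (2 * p + 1) = (2 * SbA p + (p : Int) + 1) % 1000000007 := by
  rw [SbA]
  have h2 : (2 * p + 1) / 2 = p := by omega
  have h3 : ¬ ((2 * p + 1) % 2 = 0) := by omega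
  simp [h2, h3]

lemma SbA_twom (p : Nat) (hp : 1 ≤ p) :
    SbA (2 * p - 1) = (2 * SbA (p - 1) + ((p : Int) - 1) + 1) % 1000000007 := by
  rw [SbA]
  have h0 : ¬ (2 * p - 1 = 0) := by omega
  have h2 : (2 * p - 1) / 2 = p - 1 := by omega
  have h3 : ¬ ((2 * p - 1) % 2 = 0) := by omega
  have hc : ((p - 1 : Nat) : Int) = (p : Int) - 1 := by omega
  simp [h0, h2, h3, hc]

lemma S1A_two (p : Nat) (hp : 1 ≤ p) :
    S1A (2 * p) = (1 + bA p * 2 * (p : Int) + 4 * S1A (p - 1) + SbA (p - 1)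
      + 2 * TA (p - 1) + ((p : Int) - 1)) % 1000000007 := by
  rw [S1A]
  have h0 : ¬ (2 * p = 0) := by omega
  have h1 : ¬ (2 * p = 1) := by omega
  have h2 : 2 * p / 2 = p := by omega
  have h3 : 2 * p % 2 = 0 := by omega
  have hc : ((p - 1 : Nat) : Int) = (p : Int) - 1 := by omega
  have hf1 : fA 1 = 1 := fA_one
  have hfn : fA (2 * p) = bA p * 2 * (p : Int) := by
    rw [fA, bA_two p hp]; push_cast; ring
  simp only [h0, h1, h2, h3, hc, hf1, hfn, if_false, if_true, if_pos rfl]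
  try ring_nf

lemma S1A_two1 (p : Nat) (hp : 1 ≤ p) :
    S1A (2 * p + 1) = (1 + 4 * S1A p + SbA p + 2 * TA p + (p : Int)) % 1000000007 := by
  rw [S1A]
  have h0 : ¬ (2 * p + 1 = 0) := by omega
  have h1 : ¬ (2 * p + 1 = 1) := by omega
  have h2 : (2 * p + 1) / 2 = p := by omega
  have h3 : ¬ ((2 * p + 1) % 2 = 0) := by omega
  have hf1 : fA 1 = 1 := fA_one
  simp only [h0, h1, h2, h3, hf1, if_false, if_true, if_pos rfl]
  try ring_nf

lemma S1A_twom (p : Nat) (hp : 1 ≤ p) :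
    S1A (2 * p - 1) = (1 + 4 * S1A (p - 1) + SbA (p - 1) + 2 * TA (p - 1)
      + ((p : Int) - 1)) % 1000000007 := by
  by_cases hone : p = 1
  · subst hone; norm_num [S1A_one, S1A_zero, SbA_zero, TA_zero]
  · rw [S1A]
    have h0 : ¬ (2 * p - 1 = 0) := by omega
    have h1 : ¬ (2 * p - 1 = 1) := by omega
    have h2 : (2 * p - 1) / 2 = p - 1 := by omega
    have h3 : ¬ ((2 * p - 1) % 2 = 0) := by omega
    have hc : ((p - 1 : Nat) : Int) = (p : Int) - 1 := by omega
    have hf1 : fA 1 = 1 := fA_one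
    simp only [h0, h1, h2, h3, hc, hf1, if_false, if_true, if_pos rfl]
    try ring_nf

lemma Sb2A_two (p : Nat) (hp : 1 ≤ p) :
    Sb2A (2 * p) = (1 + bA p ^ 2 + 2 * Sb2A (p - 1) + 2 * SbA (p - 1)
      + ((p : Int) - 1)) % 1000000007 := by
  rw [Sb2A]
  have h0 : ¬ (2 * p = 0) := by omega
  have h1 : ¬ (2 * p = 1) := by omega
  have h2 : 2 * p / 2 = p := by omega
  have h3 : 2 * p % 2 = 0 := by omega
  simp only [h0, h1, h2, h3, bA_two p hp, if_false, if_true, if_pos rfl]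
  try ring_nf

lemma Sb2A_two1 (p : Nat) (hp : 1 ≤ p) :
    Sb2A (2 * p + 1) = (1 + 2 * Sb2A p + 2 * SbA p + (p : Int)) % 1000000007 := by
  rw [Sb2A]
  have h0 : ¬ (2 * p + 1 = 0) := by omega
  have h1 : ¬ (2 * p + 1 = 1) := by omega
  have h2 : (2 * p + 1) / 2 = p := by omega
  have h3 : ¬ ((2 * p + 1) % 2 = 0) := by omega
  simp only [h0, h1, h2, h3, if_false, if_true, if_pos rfl]
  try ring_nf

lemma Sb2A_twom (p : Nat) (hp : 1 ≤ p) :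
    Sb2A (2 * p - 1) = (1 + 2 * Sb2A (p - 1) + 2 * SbA (p - 1) + ((p : Int) - 1)) % 1000000007 := by
  by_cases hone : p = 1
  · subst hone; norm_num [Sb2A_one, Sb2A_zero, SbA_zero]
  · rw [Sb2A]
    have h0 : ¬ (2 * p - 1 = 0) := by omega
    have h1 : ¬ (2 * p - 1 = 1) := by omega
    have h2 : (2 * p - 1) / 2 = p - 1 := by omega
    have h3 : ¬ ((2 * p - 1) % 2 = 0) := by omega
    have hc : ((p - 1 : Nat) : Int) = (p : Int) - 1 := by omega
    simp only [h0, h1, h2, h3, hc, if_false, if_true, if_pos rfl]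
    try ring_nf

lemma Sb2nA_two (p : Nat) (hp : 1 ≤ p) :
    Sb2nA (2 * p) = (1 + bA p ^ 2 * 2 * (p : Int) + 4 * Sb2nA (p - 1) + 4 * S1A (p - 1)
      + Sb2A (p - 1) + 2 * SbA (p - 1) + 2 * TA (p - 1) + ((p : Int) - 1)) % 1000000007 := by
  rw [Sb2nA]
  have h0 : ¬ (2 * p = 0) := by omega
  have h1 : ¬ (2 * p = 1) := by omega
  have h2 : 2 * p / 2 = p := by omega
  have h3 : 2 * p % 2 = 0 := by omega
  simp only [h0, h1, h2, h3, bA_two p hp, if_false, if_true, if_pos rfl]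
  push_cast
  try ring_nf

lemma Sb2nA_two1 (p : Nat) (hp : 1 ≤ p) :
    Sb2nA (2 * p + 1) = (1 + 4 * Sb2nA p + 4 * S1A p + Sb2A p + 2 * SbA p
      + 2 * TA p + (p : Int)) % 1000000007 := by
  rw [Sb2nA]
  have h0 : ¬ (2 * p + 1 = 0) := by omega
  have h1 : ¬ (2 * p + 1 = 1) := by omega
  have h2 : (2 * p + 1) / 2 = p := by omega
  have h3 : ¬ ((2 * p + 1) % 2 = 0) := by omega
  simp only [h0, h1, h2, h3, if_false, if_true, if_pos rfl]
  try ring_nf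

lemma Sb2nA_twom (p : Nat) (hp : 1 ≤ p) :
    Sb2nA (2 * p - 1) = (1 + 4 * Sb2nA (p - 1) + 4 * S1A (p - 1) + Sb2A (p - 1)
      + 2 * SbA (p - 1) + 2 * TA (p - 1) + ((p : Int) - 1)) % 1000000007 := by
  by_cases hone : p = 1
  · subst hone; norm_num [Sb2nA_one, Sb2nA_zero, S1A_zero, Sb2A_zero, SbA_zero, TA_zero]
  · rw [Sb2nA]
    have h0 : ¬ (2 * p - 1 = 0) := by omega
    have h1 : ¬ (2 * p - 1 = 1) := by omega
    have h2 : (2 * p - 1) / 2 = p - 1 := by omega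
    have h3 : ¬ ((2 * p - 1) % 2 = 0) := by omega
    have hc : ((p - 1 : Nat) : Int) = (p : Int) - 1 := by omega
    simp only [h0, h1, h2, h3, hc, if_false, if_true, if_pos rfl]
    try ring_nf

lemma TA_cast (p : Nat) (hp : 1 ≤ p) :
    TA (p - 1) = (((p : Int) - 1) * (((p : Int) - 1) + 1)) / 2 := by
  rw [TA]
  have hc : ((p - 1 : Nat) : Int) = (p : Int) - 1 := by omega
  rw [hc]

lemma pvStep_good (p : Nat) (st : PVSt) (hp : 1 ≤ p) (h : pvGood p st) (b : Bool) :
    pvGood (2 * p + (if b then 1 else 0)) (pvStep st b) := by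
  obtain ⟨hsb, hsbm, hs1, hs1m, hsb2, hsb2m, hs2n, hs2nm, hpc, hip⟩ := h
  have hTp : (st.p * (st.p + 1)) / 2 = TA p := by rw [hip, TA]
  have hTq : ((st.p - 1) * ((st.p - 1) + 1)) / 2 = TA (p - 1) := by
    rw [hip, TA_cast p hp]
  cases b
  · have hidx : 2 * p + (if (false : Bool) = true then 1 else 0) = 2 * p := by simp
    rw [hidx]
    refine ⟨?_, ?_, ?_, ?_, ?_, ?_, ?_, ?_, ?_, ?_⟩ <;>
        simp only [pvStep, Bool.false_eq_true, if_false]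
    · rw [hsb, hsbm, hip, SbA_two p hp]
    · rw [hsbm, hip, SbA_twom p hp]
    · rw [hTq, hs1m, hsbm, hpc, hip, S1A_two p hp]
    · rw [hTq, hs1m, hsbm, hip, S1A_twom p hp]
    · rw [hsb2m, hsbm, hpc, hip, Sb2A_two p hp]
    · rw [hsb2m, hsbm, hip, Sb2A_twom p hp]
    · rw [hTq, hs2nm, hs1m, hsb2m, hsbm, hpc, hip, Sb2nA_two p hp]
    · rw [hTq, hs2nm, hs1m, hsb2m, hsbm, hip, Sb2nA_twom p hp]
    · rw [hpc, bA_two p hp]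
    · rw [hip]; push_cast; ring
  · have hidx : 2 * p + (if (true : Bool) = true then 1 else 0) = 2 * p + 1 := by simp
    rw [hidx]
    have em : 2 * p + 1 - 1 = 2 * p := by omega
    refine ⟨?_, ?_, ?_, ?_, ?_, ?_, ?_, ?_, ?_, ?_⟩ <;>
        simp only [pvStep, if_true]
    · rw [hsb, hip, SbA_two1 p]
    · rw [em, hsb, hsbm, hip, SbA_two p hp]
    · rw [hTp, hs1, hsb, hip, S1A_two1 p hp]
    · rw [em, hTq, hs1m, hsbm, hpc, hip, S1A_two p hp]
    · rw [hsb2, hsb, hip, Sb2A_two1 p hp]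
    · rw [em, hsb2m, hsbm, hpc, hip, Sb2A_two p hp]
    · rw [hTp, hs2n, hs1, hsb2, hsb, hip, Sb2nA_two1 p hp]
    · rw [em, hTq, hs2nm, hs1m, hsb2m, hsbm, hpc, hip, Sb2nA_two p hp]
    · rw [hpc, bA_two1 p]
    · rw [hip]; push_cast; ring

lemma pvGood_foldl (L : List Bool) : ∀ (p : Nat) (st : PVSt), 1 ≤ p → pvGood p st →
    pvGood (pvVal p L) (L.foldl pvStep st) := by
  induction L with
  | nil => intro p st _ h; exact h
  | cons b L ih =>
      intro p st hp h
      have h' := pvStep_good p st hp h b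
      have hp' : 1 ≤ 2 * p + (if b then 1 else 0) := by omega
      have := ih (2 * p + (if b then 1 else 0)) (pvStep st b) hp' h'
      simpa [pvVal, List.foldl] using this

lemma pvBits_spec : ∀ (m : Nat), 1 ≤ m →
    ∃ L, pvBits m = true :: L ∧ pvVal 1 L = m := by
  intro m
  induction m using Nat.strong_induction_on with
  | _ m ih =>
    intro hm
    rw [pvBits, if_neg (by omega)]
    by_cases h2 : m / 2 = 0
    · have : m = 1 := by omega
      subst this
      exact ⟨[], by simp [pvBits], by simp [pvVal]⟩
    · obtain ⟨L, hL, hv⟩ := ih (m / 2) (by omega) (by omega)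
      refine ⟨L ++ [m % 2 == 1], by rw [hL]; rfl, ?_⟩
      have : pvVal 1 (L ++ [m % 2 == 1]) =
          2 * pvVal 1 L + (if (m % 2 == 1) then 1 else 0) := by
        simp [pvVal, List.foldl_append]
      rw [this, hv]
      by_cases hm2 : m % 2 = 1 <;> simp [hm2] <;> omega

lemma pvInit_good : pvGood 1 pvInit := by
  unfold pvGood pvInit
  norm_num [SbA_one, SbA_zero, S1A_one, S1A_zero, Sb2A_one, Sb2A_zero,
    Sb2nA_one, Sb2nA_zero, bA_one]

-- ===== VERDICT (by name: the statement is the Claim_ definition above) =====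
theorem Sb2n_spec : Claim_equal_Sb2n := by
  intro n _ hpre
  unfold Spec_Sb2n Sb2n Sb2n_alt
  by_cases hz : n ≤ 0
  · have : n = 0 := le_antisymm hz hpre
    subst this
    simp [Sb2nA_zero]
  · rw [if_neg hz]
    have hm : 1 ≤ n.toNat := by omega
    obtain ⟨L, hL, hv⟩ := pvBits_spec n.toNat hm
    have hdrop : (pvBits n.toNat).drop 1 = L := by rw [hL]; rfl
    rw [hdrop]
    have := pvGood_foldl L 1 pvInit (le_refl 1) pvInit_good
    rw [hv] at this
    exact (this.2.2.2.2.2.2.1).symm
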